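-- pv_equiv track=rewrite | github.com/MrBrantCode/unitest_baseline | mut_generate/mist_train_cf/cf_77140/solution.py | switch
-- ===== SOURCE A (Python) =====
-- def switch(lst1, lst2):
--     # Function to check if a number is prime
--     def is_prime(n):
--         if n <= 1:
--             return False
--         for i in range(2, n):
--             if n % i == 0:
--                 return False
--         return True
--
--     # Filter the prime and non-prime numbers in both lists
--     primes_in_lst1 = list(filter(is_prime, lst1))
--     non_primes_in_lst1 = list(filter(lambda x: not is_prime(x), lst1))
--     primes_in_lst2 = list(filter(is_prime, lst2))
--     non_primes_in_lst2 = list(filter(lambda x: not is_prime(x), lst2))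
--
--     # Check if sum of all prime and non-prime numbers remains constant after the switch
--     if sum(primes_in_lst1) + sum(non_primes_in_lst2) != sum(non_primes_in_lst1) + sum(primes_in_lst2):
--         return "NO"
--
--     return "YES"
-- ===== SOURCE B (Python) =====
-- def switch(lst1, lst2):
--     # Function to check if a number is prime
--     def is_prime(n):
--         if n <= 1:
--             return False
--         for i in range(2, n):
--             if n % i == 0:
--                 return False
--         return True
--
--     # One signed pass per list: primes count positively, non-primes negatively.
--     def bal(lst):
--         total = 0
--         for x in lst:
--             total += x if is_prime(x) else -x
--         return total
--
--     return "YES" if bal(lst1) == bal(lst2) else "NO"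
-- ===== Notes on version B (the rewrite author's own statement) =====
-- stated objective: simpler
-- what changed: Replaces the four filter passes and four sums with one signed balance per list (primes add, non-primes subtract), using P1+N2==N1+P2 iff P1-N1==P2-N2; each element is prime-tested once instead of twice.
import Mathlib
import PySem

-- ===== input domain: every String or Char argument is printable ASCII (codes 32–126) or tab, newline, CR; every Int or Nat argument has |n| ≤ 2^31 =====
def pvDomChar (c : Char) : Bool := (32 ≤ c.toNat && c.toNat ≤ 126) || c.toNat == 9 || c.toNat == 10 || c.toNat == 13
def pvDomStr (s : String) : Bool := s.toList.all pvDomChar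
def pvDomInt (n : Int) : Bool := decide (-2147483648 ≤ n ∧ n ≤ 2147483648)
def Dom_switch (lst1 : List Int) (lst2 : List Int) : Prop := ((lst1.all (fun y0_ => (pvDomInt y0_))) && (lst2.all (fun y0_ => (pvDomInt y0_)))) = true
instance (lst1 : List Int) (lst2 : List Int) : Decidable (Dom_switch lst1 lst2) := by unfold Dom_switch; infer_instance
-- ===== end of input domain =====

-- B replaces A's four filter passes and four sums by one signed balance per list (simpler decomposition).

-- ===== PORT A =====
-- shared helper: literal port of is_prime's `for i in range(2, n)` loop with its
-- early `return False` (range is iterated lazily, exact on Int)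
def isPrimeLoop (n : Int) (i : Int) : Bool :=
  if h : i < n then
    if PySem.Int.mod n i == 0 then false else isPrimeLoop n (i + 1)
  else true
termination_by (n - i).toNat
decreasing_by omega

def isPrime (n : Int) : Bool :=
  if n ≤ 1 then false else isPrimeLoop n 2

def switch (lst1 : List Int) (lst2 : List Int) : String :=
  let primes_in_lst1 := lst1.filter isPrime
  let non_primes_in_lst1 := lst1.filter (fun x => !isPrime x)
  let primes_in_lst2 := lst2.filter isPrime
  let non_primes_in_lst2 := lst2.filter (fun x => !isPrime x)
  if primes_in_lst1.sum + non_primes_in_lst2.sum ≠ non_primes_in_lst1.sum + primes_in_lst2.sum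
  then "NO" else "YES"

-- ===== PORT B =====
def bal (lst : List Int) : Int :=
  lst.foldl (fun total x => total + (if isPrime x then x else -x)) 0

def switch_alt (lst1 : List Int) (lst2 : List Int) : String :=
  if bal lst1 == bal lst2 then "YES" else "NO"

-- ===== PRECONDITION & SPEC =====
def Spec_switch (lst1 : List Int) (lst2 : List Int) (out : String) : Prop := out = switch_alt lst1 lst2
instance (lst1 : List Int) (lst2 : List Int) (out : String) : Decidable (Spec_switch lst1 lst2 out) := by unfold Spec_switch; infer_instance

-- ===== CLAIM (what is proved, stated in full; the proofs are below) =====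
def Claim_equal_switch : Prop := ∀ (lst1 : List Int) (lst2 : List Int), Dom_switch lst1 lst2 → Spec_switch lst1 lst2 (switch lst1 lst2)

-- ===== LEMMAS AND PROOFS =====

theorem bal_foldl_acc (lst : List Int) : ∀ (acc : Int),
    lst.foldl (fun total x => total + (if isPrime x then x else -x)) acc
      = acc + (lst.filter isPrime).sum - (lst.filter (fun x => !isPrime x)).sum := by
  induction lst with
  | nil => intro acc; simp
  | cons h t ih =>
    intro acc
    by_cases hp : isPrime h
    · simp [List.foldl, hp, ih]; ring
    · simp [List.foldl, hp, ih]; ring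

theorem bal_eq (lst : List Int) :
    bal lst = (lst.filter isPrime).sum - (lst.filter (fun x => !isPrime x)).sum := by
  simpa using bal_foldl_acc lst 0

-- ===== VERDICT (by name: the statement is the Claim_ definition above) =====
theorem switch_spec : Claim_equal_switch := by
  intro lst1 lst2 _
  unfold Spec_switch switch switch_alt
  rw [bal_eq lst1, bal_eq lst2]
  by_cases h : (lst1.filter isPrime).sum + (lst2.filter (fun x => !isPrime x)).sum
      = (lst1.filter (fun x => !isPrime x)).sum + (lst2.filter isPrime).sum
  · have h' : (lst1.filter isPrime).sum - (lst1.filter (fun x => !isPrime x)).sum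
        = (lst2.filter isPrime).sum - (lst2.filter (fun x => !isPrime x)).sum := by omega
    simp [h, h']
  · have h' : ¬((lst1.filter isPrime).sum - (lst1.filter (fun x => !isPrime x)).sum
        = (lst2.filter isPrime).sum - (lst2.filter (fun x => !isPrime x)).sum) := by omega
    simp [h, h']
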